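-- pv_equiv track=rewrite | github.com/JonghyunLEE12/SWEA | 프로그래머스/lv1/42840. 모의고사/모의고사.py | solution
-- ===== SOURCE A (Python) =====
-- def solution(answers):
--     answer = []
--     count1,count2,count3 = 0,0,0
--     num1 = [1,2,3,4,5]
--     num2 = [2,1,2,3,2,4,2,5]
--     num3 = [3,3,1,1,2,2,4,4,5,5]
--
--     for num in range(len(answers)):
--         if num1[num % len(num1)] == answers[num]:
--             count1 += 1
--         if num2[num % len(num2)] == answers[num]:
--             count2 += 1
--         if num3[num % len(num3)] == answers[num]:
--             count3 += 1
--
--     rlt = max(count1,count2,count3)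
--     if rlt == count1:
--         answer.append(1)
--     if rlt == count2:
--         answer.append(2)
--     if rlt == count3:
--         answer.append(3)
--
--     return answer
-- ===== SOURCE B (Python) =====
-- def solution(answers):
--     # Histogram approach: one pattern-independent pass builds a frequency table of
--     # (position mod 40, answer) pairs (40 = lcm of the three cycle lengths 5, 8, 10),
--     # then each pattern is scored against the <= 200 histogram entries, never
--     # rescanning the answers.
--     freq = {}
--     for i, a in enumerate(answers):
--         key = (i % 40, a)
--         freq[key] = freq.get(key, 0) + 1
--     patterns = [[1, 2, 3, 4, 5],
--                 [2, 1, 2, 3, 2, 4, 2, 5],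
--                 [3, 3, 1, 1, 2, 2, 4, 4, 5, 5]]
--     scores = [sum(c for (j, a), c in freq.items() if p[j % len(p)] == a)
--               for p in patterns]
--     best = max(scores)
--     return [k + 1 for k, s in enumerate(scores) if s == best]
-- ===== Notes on version B (the rewrite author's own statement) =====
-- stated objective: alternative
-- what changed: B replaces A's per-answer loop over three named counters by a two-phase histogram algorithm: one pattern-independent pass builds a dict counting (position mod 40, answer) pairs (40 = lcm of the cycle lengths), then each pattern is scored against the at most 200 histogram entries without rescanning the answers, and the winners are read off a scores list with max.
import Mathlib
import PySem

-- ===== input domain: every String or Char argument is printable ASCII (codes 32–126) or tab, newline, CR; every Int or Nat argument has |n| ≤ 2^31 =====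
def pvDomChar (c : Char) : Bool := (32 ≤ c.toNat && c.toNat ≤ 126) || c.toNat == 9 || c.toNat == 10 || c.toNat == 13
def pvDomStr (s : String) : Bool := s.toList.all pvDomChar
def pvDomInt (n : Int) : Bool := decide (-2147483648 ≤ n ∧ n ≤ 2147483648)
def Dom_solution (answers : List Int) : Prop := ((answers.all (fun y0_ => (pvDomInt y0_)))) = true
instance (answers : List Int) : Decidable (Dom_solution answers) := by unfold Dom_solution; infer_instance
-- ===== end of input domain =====

-- B replaces A's per-answer loop over three named counters by a two-phase histogram:
-- one pattern-independent pass counts (position mod 40, answer) pairs, then each pattern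
-- is scored against the histogram entries (alternative decomposition, same cost).

-- ===== PORT A =====
def solution (answers : List Int) : List Int :=
  let num1 : List Int := [1,2,3,4,5]
  let num2 : List Int := [2,1,2,3,2,4,2,5]
  let num3 : List Int := [3,3,1,1,2,2,4,4,5,5]
  -- for num in range(len(answers)): three independent counter updates (all indices in range)
  let st := (PySem.List.pyRange 0 (answers.length : Int) 1).foldl
    (fun (c : Int × Int × Int) num =>
      let c1 := if PySem.List.pyGetD num1 (PySem.Int.mod num (num1.length : Int)) 0
                   = PySem.List.pyGetD answers num 0 then c.1 + 1 else c.1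
      let c2 := if PySem.List.pyGetD num2 (PySem.Int.mod num (num2.length : Int)) 0
                   = PySem.List.pyGetD answers num 0 then c.2.1 + 1 else c.2.1
      let c3 := if PySem.List.pyGetD num3 (PySem.Int.mod num (num3.length : Int)) 0
                   = PySem.List.pyGetD answers num 0 then c.2.2 + 1 else c.2.2
      (c1, c2, c3)) ((0 : Int), (0 : Int), (0 : Int))
  let rlt := max st.1 (max st.2.1 st.2.2)
  let answer : List Int := []
  let answer := if rlt = st.1 then answer ++ [1] else answer
  let answer := if rlt = st.2.1 then answer ++ [2] else answer
  let answer := if rlt = st.2.2 then answer ++ [3] else answer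
  answer

-- ===== PORT B =====
def solution_alt (answers : List Int) : List Int :=
  -- freq[key] = freq.get(key, 0) + 1 over keys (i % 40, a)
  let freq := (PySem.List.enumerate answers 0).foldl
    (fun (d : PySem.Dict (Int × Int) Int) ia =>
      let key := (PySem.Int.mod ia.1 40, ia.2)
      d.insert key (d.getD key 0 + 1)) PySem.Dict.empty
  let patterns : List (List Int) := [[1,2,3,4,5],[2,1,2,3,2,4,2,5],[3,3,1,1,2,2,4,4,5,5]]
  -- sum(c for (j, a), c in freq.items() if p[j % len(p)] == a); the index is always in range
  let scores := patterns.map (fun p =>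
    ((freq.items.filter (fun kc =>
        PySem.List.pyGetD p (PySem.Int.mod kc.1.1 (p.length : Int)) 0 == kc.1.2)).map
      (fun kc => kc.2)).sum)
  -- scores is always a 3-element list, so max() never raises; .getD 0 is unreachable
  let best := (PySem.List.max? scores (fun x => x)).getD 0
  ((PySem.List.enumerate scores 0).filter (fun p => p.2 == best)).map (fun p => p.1 + 1)

-- ===== PRECONDITION & SPEC =====
def Spec_solution (answers : List Int) (out : List Int) : Prop := out = solution_alt answers
instance (answers : List Int) (out : List Int) : Decidable (Spec_solution answers out) := by unfold Spec_solution; infer_instance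

-- ===== CLAIM (what is proved, stated in full; the proofs are below) =====
def Claim_equal_solution : Prop := ∀ (answers : List Int), Dom_solution answers → Spec_solution answers (solution answers)

-- ===== LEMMAS AND PROOFS =====

theorem pvFoldTriple (q1 q2 q3 : Int → Prop) [DecidablePred q1] [DecidablePred q2] [DecidablePred q3]
    (r : List Int) (a b c : Int) :
    r.foldl (fun (s : Int × Int × Int) num =>
       ((if q1 num then s.1 + 1 else s.1),
        (if q2 num then s.2.1 + 1 else s.2.1),
        (if q3 num then s.2.2 + 1 else s.2.2))) (a, b, c)
     = (a + (r.map (fun n => if q1 n then (1:Int) else 0)).sum,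
        b + (r.map (fun n => if q2 n then (1:Int) else 0)).sum,
        c + (r.map (fun n => if q3 n then (1:Int) else 0)).sum) := by
  induction r generalizing a b c with
  | nil => simp
  | cons x t ih => simp only [List.foldl_cons, List.map_cons, List.sum_cons, ih]
                   split_ifs <;> refine Prod.ext ?_ (Prod.ext ?_ ?_) <;> simp <;> ring

-- filtered sum over a list = sum of an ite map
theorem pvSumFilter {α : Type} (p : α → Bool) (f : α → Int) (l : List α) :
    ((l.filter p).map f).sum = (l.map (fun x => if p x then f x else 0)).sum := by
  induction l with
  | nil => rfl
  | cons x t ih => by_cases h : p x <;> simp [h, ih]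

-- summing an ite that fires at exactly one element of a Nodup list
theorem pvSumSingle {α : Type} [BEq α] [LawfulBEq α] [DecidableEq α] (S : List α) (hnd : S.Nodup) (x : α)
    (hx : x ∈ S) (c : Int) :
    (S.map (fun k => if k = x then c else 0)).sum = c := by
  induction S with
  | nil => cases hx
  | cons y t ih =>
    rw [List.nodup_cons] at hnd
    rcases List.mem_cons.mp hx with h | h
    · subst h
      have hz : (t.map (fun k => if k = x then c else 0)).sum = 0 := by
        apply List.sum_eq_zero
        intro z hzm
        rcases List.mem_map.mp hzm with ⟨k, hk, rfl⟩
        simp [show k ≠ x from fun e => hnd.1 (e ▸ hk)]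
      simp [hz]
    · have hy : y ≠ x := fun e => hnd.1 (e ▸ h)
      simp [hy, ih hnd.2 h]

-- histogram sum: summing counts of L over its dedup, gated by q, counts q over L
theorem pvSumCount {α : Type} [BEq α] [LawfulBEq α] [DecidableEq α] (q : α → Prop) [DecidablePred q]
    (S L : List α) (hnd : S.Nodup) (hsub : ∀ y ∈ L, y ∈ S) :
    (S.map (fun k => if q k then (L.count k : Int) else 0)).sum
      = (L.map (fun y => if q y then (1:Int) else 0)).sum := by
  induction L with
  | nil => simp [List.sum_eq_zero]
  | cons x t ih =>
    have hx : x ∈ S := hsub x (List.mem_cons_self ..)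
    have hsub' : ∀ y ∈ t, y ∈ S := fun y hy => hsub y (List.mem_cons_of_mem _ hy)
    have hsplit : ∀ k : α, (if q k then ((x :: t).count k : Int) else 0)
        = (if q k then (t.count k : Int) else 0) + (if k = x then (if q x then (1:Int) else 0) else 0) := by
      intro k
      by_cases hk : k = x
      · subst hk
        by_cases hq : q k <;> simp [hq]
      · by_cases hq : q k <;>
          simp [hk, hq, show ¬ x = k from fun e => hk e.symm]
    calc (S.map (fun k => if q k then ((x :: t).count k : Int) else 0)).sum
        = (S.map (fun k => (if q k then (t.count k : Int) else 0)
            + (if k = x then (if q x then (1:Int) else 0) else 0))).sum := by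
          exact congrArg List.sum (List.map_congr_left (fun k _ => hsplit k))
      _ = (S.map (fun k => if q k then (t.count k : Int) else 0)).sum
            + (S.map (fun k => if k = x then (if q x then (1:Int) else 0) else 0)).sum := by
          rw [PySem.List.sum_map_add_int]
      _ = (t.map (fun y => if q y then (1:Int) else 0)).sum + (if q x then (1:Int) else 0) := by
          rw [ih hsub', pvSumSingle S hnd x hx]
      _ = ((x :: t).map (fun y => if q y then (1:Int) else 0)).sum := by
          simp [List.map_cons]; ring

-- B's per-pattern histogram score equals a direct indicator sum over enumerate
theorem pvHistScore (p : List Int) (answers : List Int) :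
    ((((PySem.List.enumerate answers 0).foldl
        (fun (d : PySem.Dict (Int × Int) Int) ia =>
          let key := (PySem.Int.mod ia.1 40, ia.2)
          d.insert key (d.getD key 0 + 1)) PySem.Dict.empty).items.filter (fun kc =>
        PySem.List.pyGetD p (PySem.Int.mod kc.1.1 (p.length : Int)) 0 == kc.1.2)).map
      (fun kc => kc.2)).sum
    = ((PySem.List.enumerate answers 0).map
        (fun ia => if PySem.List.pyGetD p
            (PySem.Int.mod (PySem.Int.mod ia.1 40) (p.length : Int)) 0 = ia.2
          then (1:Int) else 0)).sum := by
  have hfold : ((PySem.List.enumerate answers 0).foldl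
        (fun (d : PySem.Dict (Int × Int) Int) ia =>
          let key := (PySem.Int.mod ia.1 40, ia.2)
          d.insert key (d.getD key 0 + 1)) PySem.Dict.empty)
      = PySem.Dict.counter ((PySem.List.enumerate answers 0).map
          (fun ia => (PySem.Int.mod ia.1 40, ia.2))) := by
    rw [← PySem.Dict.foldl_insert_getD_add_one_eq_counter, List.foldl_map]
  rw [hfold, pvSumFilter, PySem.Dict.items_counter, List.map_map]
  set L := (PySem.List.enumerate answers 0).map (fun ia => (PySem.Int.mod ia.1 40, ia.2)) with hL
  have h1 : ((PySem.Set.ofList L).map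
      (fun k => if PySem.List.pyGetD p (PySem.Int.mod k.1 (p.length : Int)) 0 = k.2
                then (L.count k : Int) else 0)).sum
      = (L.map (fun y => if PySem.List.pyGetD p (PySem.Int.mod y.1 (p.length : Int)) 0 = y.2
                then (1:Int) else 0)).sum := by
    exact pvSumCount
      (fun k : Int × Int => PySem.List.pyGetD p (PySem.Int.mod k.1 (p.length : Int)) 0 = k.2)
      (PySem.Set.ofList L) L (PySem.Set.nodup_ofList L)
      (fun y hy => (PySem.Set.mem_ofList L y).mpr hy)
  calc ((PySem.Set.ofList L).map (fun k =>
          if (PySem.List.pyGetD p (PySem.Int.mod k.1 (p.length : Int)) 0 == k.2) = true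
          then (L.count k : Int) else 0)).sum
      = ((PySem.Set.ofList L).map
          (fun k => if PySem.List.pyGetD p (PySem.Int.mod k.1 (p.length : Int)) 0 = k.2
                    then (L.count k : Int) else 0)).sum := by simp
    _ = (L.map (fun y => if PySem.List.pyGetD p (PySem.Int.mod y.1 (p.length : Int)) 0 = y.2
                then (1:Int) else 0)).sum := h1
    _ = _ := by rw [hL, List.map_map]; simp [Function.comp_def]

-- (i mod 40) mod ℓ = i mod ℓ for the cycle lengths ℓ | 40
theorem pvModMod (i ℓ : Int) (hpos : (0:Int) < ℓ) (hdvd : ℓ ∣ 40) :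
    PySem.Int.mod (PySem.Int.mod i 40) ℓ = PySem.Int.mod i ℓ := by
  rw [PySem.Int.mod_eq_emod_of_pos (by norm_num : (0:Int) < 40),
      PySem.Int.mod_eq_emod_of_pos hpos, PySem.Int.mod_eq_emod_of_pos hpos]
  exact Int.emod_emod_of_dvd i hdvd

theorem pvScoreEq (p answers : List Int) :
    ((PySem.List.enumerate answers 0).map
        (fun ia => if PySem.List.pyGetD p (PySem.Int.mod ia.1 (p.length : Int)) 0 = ia.2
                   then (1 : Int) else 0)).sum
    = ((PySem.List.pyRange 0 (answers.length : Int) 1).map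
        (fun n => if PySem.List.pyGetD p (PySem.Int.mod n (p.length : Int)) 0
                     = PySem.List.pyGetD answers n 0 then (1 : Int) else 0)).sum := by
  rw [PySem.List.enumerate_eq_map_pyRange answers 0, List.map_map]
  simp [Function.comp_def]

-- B's histogram score for a cycle of length dividing 40 equals A's per-index sum
theorem pvBScoreEq (p answers : List Int) (hpos : (0:Int) < (p.length : Int))
    (hdvd : ((p.length : Int)) ∣ 40) :
    ((((PySem.List.enumerate answers 0).foldl
        (fun (d : PySem.Dict (Int × Int) Int) ia =>
          let key := (PySem.Int.mod ia.1 40, ia.2)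
          d.insert key (d.getD key 0 + 1)) PySem.Dict.empty).items.filter (fun kc =>
        PySem.List.pyGetD p (PySem.Int.mod kc.1.1 (p.length : Int)) 0 == kc.1.2)).map
      (fun kc => kc.2)).sum
    = ((PySem.List.pyRange 0 (answers.length : Int) 1).map
        (fun n => if PySem.List.pyGetD p (PySem.Int.mod n (p.length : Int)) 0
                     = PySem.List.pyGetD answers n 0 then (1 : Int) else 0)).sum := by
  rw [pvHistScore, ← pvScoreEq]
  exact congrArg List.sum (List.map_congr_left (fun ia _ => by
    rw [pvModMod _ _ hpos hdvd]))

theorem pvTailEq (s1 s2 s3 : Int) :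
    (let rlt := max s1 (max s2 s3)
     let a0 : List Int := []
     let a1 := if rlt = s1 then a0 ++ [1] else a0
     let a2 := if rlt = s2 then a1 ++ [2] else a1
     let a3 := if rlt = s3 then a2 ++ [3] else a2
     a3)
    = ((PySem.List.enumerate [s1, s2, s3] 0).filter
         (fun p => p.2 == (PySem.List.max? [s1, s2, s3] (fun x => x)).getD 0)).map
        (fun p => p.1 + 1) := by
  simp only [PySem.List.max?_id_cons, List.foldl, Option.getD_some,
             PySem.List.enumerate_cons, PySem.List.enumerate_nil]
  have hM : max (max s1 s2) s3 = max s1 (max s2 s3) := max_assoc s1 s2 s3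
  rw [hM]
  generalize hGen : max s1 (max s2 s3) = M
  simp only [show ∀ x : Int, (M = x) = (x = M) from fun x => propext eq_comm]
  simp only [List.filter_cons, List.filter_nil, beq_iff_eq]
  split_ifs <;> simp_all

-- ===== VERDICT (by name: the statement is the Claim_ definition above) =====
theorem solution_spec : Claim_equal_solution := by
  intro answers _
  unfold Spec_solution solution solution_alt
  simp only []
  rw [pvFoldTriple]
  simp only [zero_add, List.map_cons, List.map_nil]
  rw [pvBScoreEq [1,2,3,4,5] answers (by norm_num) (by norm_num),
     pvBScoreEq [2,1,2,3,2,4,2,5] answers (by norm_num) (by norm_num),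
     pvBScoreEq [3,3,1,1,2,2,4,4,5,5] answers (by norm_num) (by norm_num)]
  exact pvTailEq _ _ _
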